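-- pv_equiv track=rewrite | github.com/context-labs/group-async-inference-example-py | async/async_polling_example.py | get_sample_questions
-- ===== SOURCE A (Python) =====
-- def get_sample_questions(count: int) -> list[str]:
--     """Get a list of sample questions."""
--     questions = [
--         "What is the capital of France?",
--         "What is 2 + 2?",
--         "Name one planet in our solar system.",
--         "What color is the sky on a clear day?",
--         "How many legs does a spider have?",
--         "What is the chemical symbol for water?",
--         "Who wrote Romeo and Juliet?",
--         "What is the largest mammal on Earth?",
--         "How many continents are there?",
--         "What is the speed of light in a vacuum?",
--         "What year did World War II end?",
--         "What is the smallest prime number?",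
--         "Name the closest star to Earth.",
--         "What is the capital of Japan?",
--         "How many bones are in the human body?",
--     ]
--     return [questions[i % len(questions)] for i in range(count)]
-- ===== SOURCE B (Python) =====
-- def get_sample_questions(count: int) -> list[str]:
--     """Get a list of sample questions."""
--     questions = [
--         "What is the capital of France?",
--         "What is 2 + 2?",
--         "Name one planet in our solar system.",
--         "What color is the sky on a clear day?",
--         "How many legs does a spider have?",
--         "What is the chemical symbol for water?",
--         "Who wrote Romeo and Juliet?",
--         "What is the largest mammal on Earth?",
--         "How many continents are there?",
--         "What is the speed of light in a vacuum?",
--         "What year did World War II end?",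
--         "What is the smallest prime number?",
--         "Name the closest star to Earth.",
--         "What is the capital of Japan?",
--         "How many bones are in the human body?",
--     ]
--     if count <= 0:
--         return []
--     full, rem = divmod(count, len(questions))
--     return questions * full + questions[:rem]
-- ===== Notes on version B (the rewrite author's own statement) =====
-- stated objective: alternative
-- what changed: Replaces the per-element modular-index comprehension over range(count) with quotient/remainder block construction: questions * full + questions[:rem] from divmod(count, len(questions)), with an explicit empty result for count <= 0.
import Mathlib
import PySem

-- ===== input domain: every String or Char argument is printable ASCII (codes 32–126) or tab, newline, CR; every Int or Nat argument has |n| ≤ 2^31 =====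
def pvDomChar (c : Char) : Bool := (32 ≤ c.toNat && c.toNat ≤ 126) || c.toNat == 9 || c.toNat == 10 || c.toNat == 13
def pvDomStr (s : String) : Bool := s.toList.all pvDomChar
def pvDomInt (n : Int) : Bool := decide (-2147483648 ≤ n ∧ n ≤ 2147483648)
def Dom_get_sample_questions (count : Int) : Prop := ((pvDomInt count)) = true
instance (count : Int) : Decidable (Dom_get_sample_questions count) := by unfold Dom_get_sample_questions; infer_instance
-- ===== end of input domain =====

-- B replaces A's per-element modular-index comprehension by quotient/remainder block
-- construction (full copies of the list plus a prefix slice); alternative decomposition, same cost.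

-- shared literal constant: the fixed question list both Pythons define verbatim
def pvQuestions : List String := [
  "What is the capital of France?",
  "What is 2 + 2?",
  "Name one planet in our solar system.",
  "What color is the sky on a clear day?",
  "How many legs does a spider have?",
  "What is the chemical symbol for water?",
  "Who wrote Romeo and Juliet?",
  "What is the largest mammal on Earth?",
  "How many continents are there?",
  "What is the speed of light in a vacuum?",
  "What year did World War II end?",
  "What is the smallest prime number?",
  "Name the closest star to Earth.",
  "What is the capital of Japan?",
  "How many bones are in the human body?"]

-- ===== PORT A =====
-- questions[i % len(questions)] never raises (0 ≤ i % 15 < 15), so pyGetD with a dummy default is exact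
def get_sample_questions (count : Int) : List String :=
  (PySem.List.pyRange 0 count 1).map
    (fun i => PySem.List.pyGetD pvQuestions (PySem.Int.mod i (pvQuestions.length : Int)) "")

-- ===== PORT B =====
def get_sample_questions_alt (count : Int) : List String :=
  if count ≤ 0 then []
  else
    let full := PySem.Int.floordiv count (pvQuestions.length : Int)
    let rem := PySem.Int.mod count (pvQuestions.length : Int)
    (List.replicate full.toNat pvQuestions).flatten ++ PySem.List.slice pvQuestions none (some rem)

-- ===== PRECONDITION & SPEC =====
def Spec_get_sample_questions (count : Int) (out : List String) : Prop := out = get_sample_questions_alt count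
instance (count : Int) (out : List String) : Decidable (Spec_get_sample_questions count out) := by unfold Spec_get_sample_questions; infer_instance

-- ===== CLAIM (what is proved, stated in full; the proofs are below) =====
def Claim_equal_get_sample_questions : Prop := ∀ (count : Int), Dom_get_sample_questions count → Spec_get_sample_questions count (get_sample_questions count)

-- ===== LEMMAS AND PROOFS =====

theorem pv_main (m : Nat) :
    (PySem.List.pyRange 0 (m : Int) 1).map
      (fun i => PySem.List.pyGetD pvQuestions (PySem.Int.mod i (pvQuestions.length : Int)) "")
    = (List.replicate (m / 15) pvQuestions).flatten ++ pvQuestions.take (m % 15) := by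
  induction m with
  | zero => simp [PySem.List.pyRange_one_eq_nil]
  | succ m ih =>
    rw [show ((m + 1 : Nat) : Int) = (m : Int) + 1 by push_cast; ring,
        PySem.List.pyRange_one_succ_right (a := 0) (b := (m : Int)) (by positivity)]
    simp only [List.map_append, List.map_cons, List.map_nil, ih]
    have hlen : (pvQuestions.length : Int) = (15 : Nat) := by decide
    rw [hlen, PySem.Int.mod_natCast m 15, PySem.List.pyGetD_natCast]
    rcases Nat.lt_or_ge (m % 15) 14 with h | h
    · have h1 : (m + 1) / 15 = m / 15 := by omega
      have h2 : (m + 1) % 15 = m % 15 + 1 := by omega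
      rw [h1, h2, List.take_add_one, List.append_assoc]
      congr 2
      have hlt : m % 15 < pvQuestions.length := by
        rw [show pvQuestions.length = 15 from by decide]; omega
      simp [List.getElem?_eq_getElem hlt, List.getD]
    · have h14 : m % 15 = 14 := by omega
      have h1 : (m + 1) / 15 = m / 15 + 1 := by omega
      have h2 : (m + 1) % 15 = 0 := by omega
      rw [h1, h2, h14, List.replicate_succ', List.flatten_append]
      simp only [List.take_zero, List.append_nil, List.append_assoc]
      congr 1

-- ===== VERDICT (by name: the statement is the Claim_ definition above) =====
theorem get_sample_questions_spec : Claim_equal_get_sample_questions := by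
  intro count _
  unfold Spec_get_sample_questions get_sample_questions get_sample_questions_alt
  rcases le_or_gt count 0 with h | h
  · simp [h, PySem.List.pyRange_one_eq_nil (a := 0) (b := count) h]
  · have hm : count = ((count.toNat : Nat) : Int) := by omega
    rw [if_neg (by omega)]
    show _ = (List.replicate (PySem.Int.floordiv count (pvQuestions.length : Int)).toNat pvQuestions).flatten
        ++ PySem.List.slice pvQuestions none (some (PySem.Int.mod count (pvQuestions.length : Int)))
    rw [hm, pv_main,
        show (pvQuestions.length : Int) = ((15 : Nat) : Int) from by decide,
        PySem.Int.floordiv_natCast, PySem.Int.mod_natCast,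
        PySem.List.slice_to_natCast, Int.toNat_natCast]
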